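-- pv_equiv track=rewrite | github.com/aivarszar/TradosMatchPhrases | manual_review.py | split_into_phrases
-- ===== SOURCE A (Python) =====
-- from typing import List, Tuple, Dict
--
-- def split_into_phrases(text: str) -> List[Tuple[str, int]]:
--     """Split text into phrases for matching"""
--     # Split by common delimiters but keep them
--     parts = []
--     current = ""
--     delimiters = [',', '.', ';', ':', '(', ')']
--
--     for char in text:
--         if char in delimiters:
--             if current.strip():
--                 parts.append((current.strip(), 0))  # phrase, color_idx
--             parts.append((char, -1))  # delimiter, no color
--             current = ""
--         else:
--             current += char
--
--     if current.strip():
--         parts.append((current.strip(), 0))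
--
--     return parts
-- ===== SOURCE B (Python) =====
-- import re
--
-- _DELIMS = {',', '.', ';', ':', '(', ')'}
--
-- def split_into_phrases(text):
--     """Split text into phrases for matching"""
--     parts = []
--     for piece in re.split(r'([,.;:()])', text):
--         if piece in _DELIMS:
--             parts.append((piece, -1))
--         else:
--             s = piece.strip()
--             if s:
--                 parts.append((s, 0))
--     return parts
-- ===== Notes on version B (the rewrite author's own statement) =====
-- stated objective: faster
-- what changed: Replaces A's char-by-char loop that grows a string buffer by repeated concatenation with a one-shot re.split on a capturing delimiter class followed by a single classification pass over the pieces.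
import Mathlib
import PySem

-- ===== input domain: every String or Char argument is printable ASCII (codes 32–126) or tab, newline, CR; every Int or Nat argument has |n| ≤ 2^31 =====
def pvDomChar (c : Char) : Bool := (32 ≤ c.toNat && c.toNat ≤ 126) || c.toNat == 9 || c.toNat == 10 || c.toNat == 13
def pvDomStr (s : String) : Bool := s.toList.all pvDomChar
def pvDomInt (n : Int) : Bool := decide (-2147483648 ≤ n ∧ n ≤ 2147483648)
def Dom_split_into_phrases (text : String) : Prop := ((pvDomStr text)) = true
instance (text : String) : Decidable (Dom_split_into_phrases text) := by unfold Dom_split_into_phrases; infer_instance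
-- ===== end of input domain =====

-- B replaces A's char-by-char accumulation with a split-on-delimiters tokenization followed by one classification pass (measured constant-factor speedup: regex engine vs per-char string concatenation).


-- ===== PORT A =====
-- delimiters = [',', '.', ';', ':', '(', ')']
def pvDelims : List Char := [',', '.', ';', ':', '(', ')']

-- the 'for char in text' loop: state (parts, current); branches in Python's order
def pvGoA : List Char → List (List Char × Int) → List Char → List (List Char × Int)
  | [], parts, cur =>
      if PySem.Chars.strip cur ≠ [] then parts ++ [(PySem.Chars.strip cur, 0)] else parts
  | c :: rest, parts, cur =>
      if c ∈ pvDelims then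
        pvGoA rest
          ((if PySem.Chars.strip cur ≠ [] then parts ++ [(PySem.Chars.strip cur, 0)] else parts)
            ++ [([c], (-1 : Int))]) []
      else
        pvGoA rest parts (cur ++ [c])

def split_into_phrases (text : String) : List (String × Int) :=
  (pvGoA text.toList [] []).map (fun p => (String.ofList p.1, p.2))

-- ===== PORT B =====
-- re.split(r'([,.;:()])', text): pieces in order, delimiters kept as their own pieces,
-- with (possibly empty) text runs between/around them — exact for this single-char-class pattern
def pvTokenize : List Char → List Char → List (List Char)
  | [], rcur => [rcur.reverse]
  | c :: rest, rcur =>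
      if c ∈ pvDelims then rcur.reverse :: [c] :: pvTokenize rest []
      else pvTokenize rest (c :: rcur)

-- one piece of B's classification loop (body of the 'for piece in …' loop)
def pvEmit (p : List Char) : List (List Char × Int) :=
  if p ∈ pvDelims.map (fun d => [d]) then [(p, (-1 : Int))]
  else
    let s := PySem.Chars.strip p
    if s ≠ [] then [(s, 0)] else []

def split_into_phrases_alt (text : String) : List (String × Int) :=
  ((pvTokenize text.toList []).flatMap pvEmit).map (fun p => (String.ofList p.1, p.2))

-- ===== PRECONDITION & SPEC =====
def Spec_split_into_phrases (text : String) (out : List (String × Int)) : Prop := out = split_into_phrases_alt text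
instance (text : String) (out : List (String × Int)) : Decidable (Spec_split_into_phrases text out) := by unfold Spec_split_into_phrases; infer_instance

-- ===== CLAIM (what is proved, stated in full; the proofs are below) =====
def Claim_equal_split_into_phrases : Prop := ∀ (text : String), Dom_split_into_phrases text → Spec_split_into_phrases text (split_into_phrases text)

-- ===== LEMMAS AND PROOFS =====

-- a text run (no delimiter inside) is never classified as a delimiter piece
lemma pvEmit_run (cur : List Char) (h : ∀ c ∈ cur, c ∉ pvDelims) :
    pvEmit cur = if PySem.Chars.strip cur ≠ [] then [(PySem.Chars.strip cur, 0)] else [] := by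
  unfold pvEmit
  rw [if_neg]
  intro hmem
  rcases List.mem_map.mp hmem with ⟨d, hd, heq⟩
  exact h d (heq ▸ List.mem_singleton_self d) hd

lemma pvEmit_delim (c : Char) (h : c ∈ pvDelims) :
    pvEmit [c] = [([c], (-1 : Int))] := by
  unfold pvEmit
  rw [if_pos (List.mem_map.mpr ⟨c, h, rfl⟩)]

-- loop invariant: A's accumulation equals B's tokenize-then-classify on the remaining input
lemma pvGoA_eq (cs : List Char) :
    ∀ (parts : List (List Char × Int)) (cur : List Char), (∀ c ∈ cur, c ∉ pvDelims) →
      pvGoA cs parts cur = parts ++ (pvTokenize cs cur.reverse).flatMap pvEmit := by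
  induction cs with
  | nil =>
      intro parts cur h
      simp only [pvGoA, pvTokenize, List.flatMap_cons, List.flatMap_nil, List.append_nil,
        List.reverse_reverse, pvEmit_run cur h]
      split <;> simp
  | cons c rest ih =>
      intro parts cur h
      by_cases hc : c ∈ pvDelims
      · simp only [pvGoA, if_pos hc, pvTokenize, List.reverse_reverse]
        rw [ih _ [] (by simp)]
        simp only [List.flatMap_cons, pvEmit_run cur h, pvEmit_delim c hc]
        split <;> simp
      · simp only [pvGoA, if_neg hc, pvTokenize]
        rw [ih parts (cur ++ [c]) (by intro x hx; rcases List.mem_append.mp hx with h1 | h1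
                                      · exact h x h1
                                      · simp at h1; subst h1; exact hc)]
        simp

-- ===== VERDICT (by name: the statement is the Claim_ definition above) =====
theorem split_into_phrases_spec : Claim_equal_split_into_phrases := by
  intro text _
  unfold Spec_split_into_phrases split_into_phrases split_into_phrases_alt
  rw [pvGoA_eq text.toList [] [] (by simp)]
  simp
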